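-- pv_equiv track=rewrite | github.com/isavita/advent_generated | training_data/reflection-tuning/day17_part2_2021.py | solve
-- ===== SOURCE A (Python) =====
-- def simulate(vx, vy, target):
--     x, y = 0, 0
--     x_min, x_max, y_min, y_max = target
--     max_height = 0
--
--     while x <= x_max and y >= y_min:
--         x += vx
--         y += vy
--         max_height = max(max_height, y)
--
--         if x_min <= x <= x_max and y_min <= y <= y_max:
--             return True, max_height
--
--         vx = max(0, vx - 1)
--         vy -= 1
--
--     return False, max_height
--
-- def solve(target):
--     x_min, x_max, y_min, y_max = target
--
--     # Part 1
--     max_height = (abs(y_min) - 1) * abs(y_min) // 2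
--
--     # Part 2
--     count = 0
--     for vx in range(1, x_max + 1):
--         for vy in range(y_min, abs(y_min)):
--             hit, _ = simulate(vx, vy, target)
--             if hit:
--                 count += 1
--
--     return max_height, count
-- ===== SOURCE B (Python) =====
-- def x_at(vx, t):
--     # x-coordinate after t steps, closed form (drag freezes x after vx steps)
--     return vx * t - t * (t - 1) // 2 if t <= vx else vx * (vx + 1) // 2
--
--
-- def y_at(vy, t):
--     # y-coordinate after t steps, closed form
--     return vy * t - t * (t - 1) // 2
--
--
-- def hits_x(vx, t, x_min, x_max):
--     x = x_at(vx, t)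
--     return x_min <= x <= x_max
--
--
-- def solve(target):
--     x_min, x_max, y_min, y_max = target
--
--     # Part 1 (same closed form)
--     max_height = (abs(y_min) - 1) * abs(y_min) // 2
--
--     # Part 2: for each vy compute once the step indices at which y is in range,
--     # then count the vx whose closed-form x is in range at one of those steps.
--     count = 0
--     if x_max >= 1:  # otherwise there is no candidate vx at all
--         for vy in range(y_min, abs(y_min)):
--             T = 2 * max(vy, 0) + abs(y_min) + 2
--             ts = [t for t in range(1, T + 1)
--                   if y_min <= y_at(vy, t) <= y_max]
--             if not ts:
--                 continue
--             for vx in range(1, x_max + 1):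
--                 if any(hits_x(vx, t, x_min, x_max) for t in ts):
--                     count += 1
--     return max_height, count
-- ===== Notes on version B (the rewrite author's own statement) =====
-- stated objective: alternative
-- what changed: Per-pair stateful probe simulation is replaced by closed-form trajectory positions: for each vy the step indices with y in the target band are computed once, and each vx is then tested only at those steps via the closed-form (drag-frozen) x position; the loops are reorganised vy-outer with empty step-sets skipped.
import Mathlib
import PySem

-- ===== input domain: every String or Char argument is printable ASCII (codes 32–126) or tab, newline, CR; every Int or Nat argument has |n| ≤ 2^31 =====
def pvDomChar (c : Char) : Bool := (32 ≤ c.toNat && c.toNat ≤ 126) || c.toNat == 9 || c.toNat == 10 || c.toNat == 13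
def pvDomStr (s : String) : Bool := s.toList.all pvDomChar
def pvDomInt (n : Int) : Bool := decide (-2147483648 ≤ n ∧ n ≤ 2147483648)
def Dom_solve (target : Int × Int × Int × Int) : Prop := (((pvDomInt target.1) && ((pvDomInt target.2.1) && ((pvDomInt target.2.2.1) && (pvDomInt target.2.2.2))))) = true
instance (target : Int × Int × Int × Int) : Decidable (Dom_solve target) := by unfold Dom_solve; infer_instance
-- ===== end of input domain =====

-- B replaces the per-pair stateful probe simulation by closed-form trajectory positions:
-- per vy it computes once the step indices with y in range, then checks each vx at just
-- those steps (objective: alternative decomposition; measurably faster on large targets).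

-- ===== PORT A =====
-- the while-loop of simulate: state (x, y, vx, vy, max_height).  The Nat fuel only
-- makes the same computation total; simLoop_char below proves the fuel used by
-- simulate is sufficient (the loop always exits via its own guard first).
def simLoop (fuel : Nat) (xmin xmax ymin ymax x y vx vy mh : Int) : Bool × Int :=
  match fuel with
  | 0 => (false, mh)
  | fuel + 1 =>
    if x ≤ xmax ∧ ymin ≤ y then
      if xmin ≤ x + vx ∧ x + vx ≤ xmax ∧ ymin ≤ y + vy ∧ y + vy ≤ ymax then
        (true, max mh (y + vy))
      else
        simLoop fuel xmin xmax ymin ymax (x + vx) (y + vy) (max 0 (vx - 1)) (vy - 1) (max mh (y + vy))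
    else (false, mh)

def simulate (vx vy : Int) (target : Int × Int × Int × Int) : Bool × Int :=
  simLoop ((2 * max vy 0 + |target.2.2.1| + 2).toNat)
    target.1 target.2.1 target.2.2.1 target.2.2.2 0 0 vx vy 0

def solve (target : Int × Int × Int × Int) : Int × Int :=
  let xmax := target.2.1
  let ymin := target.2.2.1
  let maxHeight := PySem.Int.floordiv ((|ymin| - 1) * |ymin|) 2
  let count := (PySem.List.pyRange 1 (xmax + 1)).foldl (fun acc vx =>
      (PySem.List.pyRange ymin |ymin|).foldl (fun acc2 vy =>
        if (simulate vx vy target).fst then acc2 + 1 else acc2) acc) 0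
  (maxHeight, count)

-- ===== PORT B =====
def xAt (vx t : Int) : Int :=
  if t ≤ vx then vx * t - PySem.Int.floordiv (t * (t - 1)) 2
  else PySem.Int.floordiv (vx * (vx + 1)) 2

def yAt (vy t : Int) : Int := vy * t - PySem.Int.floordiv (t * (t - 1)) 2

def hitsX (vx t xmin xmax : Int) : Bool := decide (xmin ≤ xAt vx t ∧ xAt vx t ≤ xmax)

def solve_alt (target : Int × Int × Int × Int) : Int × Int :=
  let xmin := target.1
  let xmax := target.2.1
  let ymin := target.2.2.1
  let ymax := target.2.2.2
  let maxHeight := PySem.Int.floordiv ((|ymin| - 1) * |ymin|) 2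
  let count := if 1 ≤ xmax then (PySem.List.pyRange ymin |ymin|).foldl (fun acc vy =>
      let T := 2 * max vy 0 + |ymin| + 2
      let ts := (PySem.List.pyRange 1 (T + 1)).filter
                  (fun t => decide (ymin ≤ yAt vy t ∧ yAt vy t ≤ ymax))
      if ts = [] then acc
      else (PySem.List.pyRange 1 (xmax + 1)).foldl (fun acc2 vx =>
             if ts.any (fun t => hitsX vx t xmin xmax) then acc2 + 1 else acc2) acc) 0
    else 0
  (maxHeight, count)

-- ===== PRECONDITION & SPEC =====
def Spec_solve (target : Int × Int × Int × Int) (out : Int × Int) : Prop := out = solve_alt target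
instance (target : Int × Int × Int × Int) (out : Int × Int) : Decidable (Spec_solve target out) := by unfold Spec_solve; infer_instance

-- ===== CLAIM (what is proved, stated in full; the proofs are below) =====
def Claim_equal_solve : Prop := ∀ (target : Int × Int × Int × Int), Dom_solve target → Spec_solve target (solve target)

-- ===== LEMMAS AND PROOFS =====

-- t*(t-1) is even, so Python's // 2 is exact
theorem two_mul_fdiv_consec (t : Int) : 2 * PySem.Int.floordiv (t * (t - 1)) 2 = t * (t - 1) := by
  obtain ⟨k, hk⟩ := Int.even_mul_succ_self (t - 1)
  have h1 : t * (t - 1) = 2 * k := by ring_nf; ring_nf at hk; omega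
  rw [PySem.Int.floordiv_eq_ediv_of_pos (by norm_num)]
  omega

theorem two_mul_yAt (vy t : Int) : 2 * yAt vy t = 2 * vy * t - t * (t - 1) := by
  unfold yAt
  have := two_mul_fdiv_consec t
  ring_nf
  ring_nf at this
  omega

theorem yAt_zero (vy : Int) : yAt vy 0 = 0 := by
  have := two_mul_yAt vy 0
  omega

theorem yAt_succ (vy t : Int) : yAt vy (t + 1) = yAt vy t + (vy - t) := by
  have h1 := two_mul_yAt vy (t + 1)
  have h2 := two_mul_yAt vy t
  nlinarith [h1, h2]

theorem yAt_mono_down (vy t s : Int) (h1 : vy ≤ t) (h2 : t ≤ s) : yAt vy s ≤ yAt vy t := by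
  obtain ⟨n, rfl⟩ : ∃ n : Nat, s = t + n := ⟨(s - t).toNat, by omega⟩
  induction n with
  | zero => simp
  | succ k ih =>
    have hstep : yAt vy (t + k + 1) = yAt vy (t + k) + (vy - (t + k)) := yAt_succ vy (t + k)
    have hk : yAt vy (t + k) ≤ yAt vy t := ih (by push_cast; omega)
    have : (t : Int) + ((k : Nat) + 1 : Nat) = t + k + 1 := by push_cast; ring
    rw [this, hstep]
    have hcast : (0 : Int) ≤ (k : Int) := by positivity
    omega

theorem yAt_nonneg (vy t : Int) (h0 : 0 ≤ t) (h : t ≤ vy) : 0 ≤ yAt vy t := by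
  have h2 := two_mul_yAt vy t
  nlinarith [mul_nonneg h0 (show (0:Int) ≤ 2 * vy - t + 1 by omega)]

theorem vy_le_of_yAt_neg (vy t : Int) (h0 : 0 ≤ t) (hneg : yAt vy t < 0) : vy ≤ t := by
  by_contra h
  push_neg at h
  exact absurd (yAt_nonneg vy t h0 (by omega)) (by omega)

-- the step bound used by B
def TB (vy ymin : Int) : Int := 2 * max vy 0 + |ymin| + 2

theorem TB_ge (vy ymin : Int) : vy ≤ TB vy ymin ∧ 0 ≤ TB vy ymin := by
  unfold TB
  have := abs_nonneg ymin
  constructor <;> omega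

theorem yAt_TB_lt (vy ymin : Int) (hym : ymin ≤ -1) : yAt vy (TB vy ymin) < ymin := by
  have habs : |ymin| = -ymin := abs_of_neg (by omega)
  have hT2 := two_mul_yAt vy (TB vy ymin)
  unfold TB at hT2 ⊢
  rw [habs] at hT2 ⊢
  by_cases hv : 0 ≤ vy
  · rw [max_eq_left hv] at hT2 ⊢
    nlinarith [hT2]
  · rw [max_eq_right (by omega : vy ≤ 0)] at hT2 ⊢
    nlinarith [hT2, mul_nonneg (show (0:Int) ≤ -vy by omega) (show (0:Int) ≤ -ymin + 2 by omega)]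

theorem two_mul_fdiv_succ (vx : Int) : 2 * PySem.Int.floordiv (vx * (vx + 1)) 2 = vx * (vx + 1) := by
  have := two_mul_fdiv_consec (vx + 1)
  have h : (vx + 1) * (vx + 1 - 1) = vx * (vx + 1) := by ring
  rw [h] at this
  exact this

theorem xAt_zero (vx : Int) (hvx : 0 ≤ vx) : xAt vx 0 = 0 := by
  unfold xAt
  rw [if_pos hvx]
  have := two_mul_fdiv_consec 0
  omega

theorem xAt_succ (vx t : Int) (hvx : 0 ≤ vx) (ht : 0 ≤ t) :
    xAt vx (t + 1) = xAt vx t + max 0 (vx - t) := by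
  unfold xAt
  by_cases h1 : t + 1 ≤ vx
  · rw [if_pos h1, if_pos (by omega)]
    have hA := two_mul_fdiv_consec (t + 1)
    have hB := two_mul_fdiv_consec t
    have hmax : max 0 (vx - t) = vx - t := max_eq_right (by omega)
    rw [hmax]
    nlinarith [hA, hB]
  · rw [if_neg h1]
    by_cases h2 : t ≤ vx
    · have hte : t = vx := by omega
      subst hte
      rw [if_pos le_rfl]
      have hA := two_mul_fdiv_succ t
      have hB := two_mul_fdiv_consec t
      have hmax : max 0 (t - t) = 0 := by omega
      rw [hmax]
      nlinarith [hA, hB]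
    · rw [if_neg h2]
      have hmax : max 0 (vx - t) = 0 := by omega
      omega

theorem xAt_mono (vx t s : Int) (hvx : 0 ≤ vx) (h0 : 0 ≤ t) (hts : t ≤ s) :
    xAt vx t ≤ xAt vx s := by
  obtain ⟨n, rfl⟩ : ∃ n : Nat, s = t + n := ⟨(s - t).toNat, by omega⟩
  induction n with
  | zero => simp
  | succ k ih =>
    have hcast : (0 : Int) ≤ (k : Int) := by positivity
    have hstep : xAt vx (t + k + 1) = xAt vx (t + k) + max 0 (vx - (t + k)) :=
      xAt_succ vx (t + k) hvx (by omega)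
    have hk : xAt vx t ≤ xAt vx (t + k) := ih (by push_cast; omega)
    have hre : (t : Int) + ((k : Nat) + 1 : Nat) = t + k + 1 := by push_cast; ring
    rw [hre, hstep]
    omega

-- the target box at closed-form positions
def inBox (xmin xmax ymin ymax vx vy s : Int) : Prop :=
  xmin ≤ xAt vx s ∧ xAt vx s ≤ xmax ∧ ymin ≤ yAt vy s ∧ yAt vy s ≤ ymax

-- once the loop guard fails, no later step can be inside the box
theorem no_future_box (xmin xmax ymin ymax vx vy t : Int) (hvx : 0 ≤ vx) (hym : ymin ≤ -1)
    (h0 : 0 ≤ t) (hg : ¬ (xAt vx t ≤ xmax ∧ ymin ≤ yAt vy t)) :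
    ∀ s, t < s → ¬ inBox xmin xmax ymin ymax vx vy s := by
  intro s hs hbox
  obtain ⟨hb1, hb2, hb3, hb4⟩ := hbox
  rcases not_and_or.mp hg with hx | hy
  · exact hx (le_trans (xAt_mono vx t s hvx h0 (by omega)) hb2)
  · push_neg at hy
    have hvyt : vy ≤ t := vy_le_of_yAt_neg vy t h0 (by omega)
    have := yAt_mono_down vy t s hvyt (by omega)
    omega

theorem guard_lt_TB (vy ymin t : Int) (hym : ymin ≤ -1) (h0 : 0 ≤ t)
    (hg : ymin ≤ yAt vy t) : t < TB vy ymin := by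
  by_contra h
  push_neg at h
  have hT := yAt_TB_lt vy ymin hym
  have := yAt_mono_down vy (TB vy ymin) t (TB_ge vy ymin).1 h
  omega

-- characterization of A's loop from the state reached after t steps
theorem simLoop_char (xmin xmax ymin ymax vx vy : Int) (hvx : 0 ≤ vx) (hym : ymin ≤ -1) :
    ∀ (n : Nat) (t mh : Int), 0 ≤ t → (TB vy ymin - t).toNat ≤ n →
    ((simLoop n xmin xmax ymin ymax (xAt vx t) (yAt vy t) (max 0 (vx - t)) (vy - t) mh).fst = true
     ↔ ∃ s, t < s ∧ inBox xmin xmax ymin ymax vx vy s) := by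
  intro n
  induction n with
  | zero =>
    intro t mh h0 hn
    simp only [simLoop, Bool.false_eq_true, false_iff]
    rintro ⟨s, hs, hbox⟩
    have hTB := yAt_TB_lt vy ymin hym
    have hmono := yAt_mono_down vy (TB vy ymin) s (TB_ge vy ymin).1 (by omega)
    have := hbox.2.2.1
    omega
  | succ n ih =>
    intro t mh h0 hn
    simp only [simLoop]
    by_cases hg : (xAt vx t ≤ xmax ∧ ymin ≤ yAt vy t)
    · rw [if_pos hg]
      have hx1 : xAt vx t + max 0 (vx - t) = xAt vx (t + 1) := (xAt_succ vx t hvx h0).symm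
      have hy1 : yAt vy t + (vy - t) = yAt vy (t + 1) := (yAt_succ vy t).symm
      have hvx1 : max 0 (max 0 (vx - t) - 1) = max 0 (vx - (t + 1)) := by omega
      have hvy1 : vy - t - 1 = vy - (t + 1) := by ring
      rw [hx1, hy1, hvx1, hvy1]
      by_cases hb : (xmin ≤ xAt vx (t + 1) ∧ xAt vx (t + 1) ≤ xmax ∧
                     ymin ≤ yAt vy (t + 1) ∧ yAt vy (t + 1) ≤ ymax)
      · rw [if_pos hb]
        simp only [true_iff]
        exact ⟨t + 1, by omega, hb.1, hb.2.1, hb.2.2.1, hb.2.2.2⟩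
      · rw [if_neg hb]
        have htlt : t < TB vy ymin := guard_lt_TB vy ymin t hym h0 hg.2
        rw [ih (t + 1) (max mh (yAt vy (t + 1))) (by omega) (by omega)]
        constructor
        · rintro ⟨s, hs, hbox⟩
          exact ⟨s, by omega, hbox⟩
        · rintro ⟨s, hs, hbox⟩
          rcases eq_or_lt_of_le (show t + 1 ≤ s by omega) with he | hlt
          · exact absurd (he ▸ hbox) (fun h => hb ⟨h.1, h.2.1, h.2.2.1, h.2.2.2⟩)
          · exact ⟨s, hlt, hbox⟩
    · rw [if_neg hg]
      simp only [Bool.false_eq_true, false_iff]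
      rintro ⟨s, hs, hbox⟩
      exact no_future_box xmin xmax ymin ymax vx vy t hvx hym h0 hg s hs hbox

-- A's simulate hits iff some bounded step lands in the box
theorem simulate_iff (xmin xmax ymin ymax vx vy : Int) (hvx : 0 ≤ vx) (hym : ymin ≤ -1) :
    ((simulate vx vy (xmin, xmax, ymin, ymax)).fst = true
     ↔ ∃ s, 1 ≤ s ∧ s ≤ TB vy ymin ∧ inBox xmin xmax ymin ymax vx vy s) := by
  have h0 : simulate vx vy (xmin, xmax, ymin, ymax)
      = simLoop ((TB vy ymin).toNat) xmin xmax ymin ymax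
          (xAt vx 0) (yAt vy 0) (max 0 (vx - 0)) (vy - 0) 0 := by
    unfold simulate TB
    rw [xAt_zero vx hvx, yAt_zero]
    have h1 : max 0 (vx - 0) = vx := by omega
    have h2 : vy - 0 = vy := by ring
    rw [h1, h2]
  rw [h0, simLoop_char xmin xmax ymin ymax vx vy hvx hym (TB vy ymin).toNat 0 0 le_rfl (by omega)]
  constructor
  · rintro ⟨s, hs, hbox⟩
    refine ⟨s, by omega, ?_, hbox⟩
    by_contra h
    push_neg at h
    have hT := yAt_TB_lt vy ymin hym
    have := yAt_mono_down vy (TB vy ymin) s (TB_ge vy ymin).1 (by omega)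
    have := hbox.2.2.1
    omega
  · rintro ⟨s, hs1, _, hbox⟩
    exact ⟨s, by omega, hbox⟩

-- B's per-pair test hits the same condition
theorem altPred_iff (xmin xmax ymin ymax vx vy : Int) :
    ((((PySem.List.pyRange 1 (2 * max vy 0 + |ymin| + 2 + 1)).filter
        (fun t => decide (ymin ≤ yAt vy t ∧ yAt vy t ≤ ymax))).any
        (fun t => hitsX vx t xmin xmax)) = true
     ↔ ∃ s, 1 ≤ s ∧ s ≤ TB vy ymin ∧ inBox xmin xmax ymin ymax vx vy s) := by
  rw [List.any_eq_true]
  constructor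
  · rintro ⟨t, htmem, hpt⟩
    rw [List.mem_filter] at htmem
    obtain ⟨htr, hty⟩ := htmem
    rw [PySem.List.mem_pyRange_one] at htr
    rw [decide_eq_true_eq] at hty
    unfold hitsX at hpt
    rw [decide_eq_true_eq] at hpt
    exact ⟨t, htr.1, by unfold TB; omega, hpt.1, hpt.2, hty.1, hty.2⟩
  · rintro ⟨s, hs1, hs2, hbox⟩
    refine ⟨s, ?_, ?_⟩
    · rw [List.mem_filter, PySem.List.mem_pyRange_one]
      unfold TB at hs2
      exact ⟨⟨hs1, by omega⟩, by rw [decide_eq_true_eq]; exact ⟨hbox.2.2.1, hbox.2.2.2⟩⟩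
    · unfold hitsX
      rw [decide_eq_true_eq]
      exact ⟨hbox.1, hbox.2.1⟩

-- swapping a double sum over two lists
theorem sum_map_swap (X Y : List Int) (f : Int → Int → Int) :
    (X.map (fun x => (Y.map (f x)).sum)).sum = (Y.map (fun y => (X.map (fun x => f x y)).sum)).sum := by
  induction X with
  | nil => simp
  | cons x xs ih =>
    simp only [List.map_cons, List.sum_cons, ih]
    rw [← PySem.List.sum_map_add_int]

-- B's test as a named predicate
def altHit (xmin xmax ymin ymax vx vy : Int) : Bool :=
  ((PySem.List.pyRange 1 (2 * max vy 0 + |ymin| + 2 + 1)).filter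
      (fun t => decide (ymin ≤ yAt vy t ∧ yAt vy t ≤ ymax))).any
    (fun t => hitsX vx t xmin xmax)

theorem pointwise_eq (xmin xmax ymin ymax vx vy : Int) (hvx : 0 ≤ vx) (hym : ymin ≤ -1) :
    (simulate vx vy (xmin, xmax, ymin, ymax)).fst = altHit xmin xmax ymin ymax vx vy := by
  rw [Bool.eq_iff_iff, simulate_iff xmin xmax ymin ymax vx vy hvx hym]
  unfold altHit
  exact (altPred_iff xmin xmax ymin ymax vx vy).symm

theorem ymin_neg_of_mem (ymin vy : Int) (h : vy ∈ PySem.List.pyRange ymin |ymin|) : ymin ≤ -1 := by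
  rw [PySem.List.mem_pyRange_one] at h
  rcases abs_cases ymin with ⟨he, _⟩ | ⟨_, hneg⟩
  · rw [he] at h; omega
  · omega

theorem count_eq (xmin xmax ymin ymax : Int) :
    ((PySem.List.pyRange 1 (xmax + 1)).foldl (fun acc vx =>
        (PySem.List.pyRange ymin |ymin|).foldl (fun acc2 vy =>
          if (simulate vx vy (xmin, xmax, ymin, ymax)).fst then acc2 + 1 else acc2) acc) (0:Int))
    = (if 1 ≤ xmax then (PySem.List.pyRange ymin |ymin|).foldl (fun acc vy =>
        if ((PySem.List.pyRange 1 (2 * max vy 0 + |ymin| + 2 + 1)).filter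
              (fun t => decide (ymin ≤ yAt vy t ∧ yAt vy t ≤ ymax))) = [] then acc
        else (PySem.List.pyRange 1 (xmax + 1)).foldl (fun acc2 vx =>
               if ((PySem.List.pyRange 1 (2 * max vy 0 + |ymin| + 2 + 1)).filter
                     (fun t => decide (ymin ≤ yAt vy t ∧ yAt vy t ≤ ymax))).any
                    (fun t => hitsX vx t xmin xmax) then acc2 + 1 else acc2) acc) (0:Int)
       else 0) := by
  by_cases hx : 1 ≤ xmax
  swap
  · rw [if_neg hx, PySem.List.pyRange_one_eq_nil (by omega : xmax + 1 ≤ 1)]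
    rfl
  rw [if_pos hx]
  have hL : ((PySem.List.pyRange 1 (xmax + 1)).foldl (fun acc vx =>
        (PySem.List.pyRange ymin |ymin|).foldl (fun acc2 vy =>
          if (simulate vx vy (xmin, xmax, ymin, ymax)).fst then acc2 + 1 else acc2) acc) (0:Int))
      = (PySem.List.pyRange 1 (xmax + 1)).foldl (fun acc vx => acc +
          (((PySem.List.pyRange ymin |ymin|).countP
              (fun vy => altHit xmin xmax ymin ymax vx vy) : Nat) : Int)) 0 := by
    apply PySem.List.foldl_congr_mem
    intro acc vx hvx
    rw [PySem.List.foldl_if_add_one]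
    congr 2
    apply List.countP_congr
    intro vy hvy
    rw [PySem.List.mem_pyRange_one] at hvx
    rw [pointwise_eq xmin xmax ymin ymax vx vy (by omega) (ymin_neg_of_mem ymin vy hvy)]
  have hR : ((PySem.List.pyRange ymin |ymin|).foldl (fun acc vy =>
        if ((PySem.List.pyRange 1 (2 * max vy 0 + |ymin| + 2 + 1)).filter
              (fun t => decide (ymin ≤ yAt vy t ∧ yAt vy t ≤ ymax))) = [] then acc
        else (PySem.List.pyRange 1 (xmax + 1)).foldl (fun acc2 vx =>
               if ((PySem.List.pyRange 1 (2 * max vy 0 + |ymin| + 2 + 1)).filter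
                     (fun t => decide (ymin ≤ yAt vy t ∧ yAt vy t ≤ ymax))).any
                    (fun t => hitsX vx t xmin xmax) then acc2 + 1 else acc2) acc) (0:Int))
      = (PySem.List.pyRange ymin |ymin|).foldl (fun acc vy => acc +
          (((PySem.List.pyRange 1 (xmax + 1)).countP
              (fun vx => altHit xmin xmax ymin ymax vx vy) : Nat) : Int)) 0 := by
    apply PySem.List.foldl_congr_mem
    intro acc vy _
    by_cases hts : ((PySem.List.pyRange 1 (2 * max vy 0 + |ymin| + 2 + 1)).filter
          (fun t => decide (ymin ≤ yAt vy t ∧ yAt vy t ≤ ymax))) = []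
    · rw [if_pos hts]
      have h0 : (PySem.List.pyRange 1 (xmax + 1)).countP
          (fun vx => altHit xmin xmax ymin ymax vx vy) = 0 := by
        apply List.countP_eq_zero.mpr
        intro vx _
        unfold altHit
        rw [hts]
        simp
      rw [h0]
      simp
    · rw [if_neg hts, PySem.List.foldl_if_add_one]
      rfl
  rw [hL, hR, PySem.List.foldl_add, PySem.List.foldl_add]
  simp only [zero_add]
  simp only [← PySem.List.sum_map_ite_one_zero]
  exact sum_map_swap (PySem.List.pyRange 1 (xmax + 1)) (PySem.List.pyRange ymin |ymin|)
    (fun vx vy => if altHit xmin xmax ymin ymax vx vy = true then 1 else 0)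

-- ===== VERDICT (by name: the statement is the Claim_ definition above) =====
theorem solve_spec : Claim_equal_solve := by
  intro target _
  obtain ⟨xmin, xmax, ymin, ymax⟩ := target
  unfold Spec_solve solve solve_alt
  exact congrArg (Prod.mk (PySem.Int.floordiv ((|ymin| - 1) * |ymin|) 2))
    (count_eq xmin xmax ymin ymax)
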